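-- pv_equiv track=rewrite | github.com/gut-puncture/The-Shape-of-Wisdom | src/sow/ccc/build_ccc.py | compute_ccc_intersection
-- ===== SOURCE A (Python) =====
-- from typing import Any, Dict, Iterable, List, Optional, Set, Tuple
--
-- def compute_ccc_intersection(per_model_example_ids: Dict[str, Set[str]]) -> List[str]:
--     if not per_model_example_ids:
--         raise ValueError("no models provided")
--     it = iter(per_model_example_ids.values())
--     inter = set(next(it))
--     for s in it:
--         inter &= set(s)
--     return sorted(inter)
-- ===== SOURCE B (Python) =====
-- from typing import Dict, List, Set
--
--
-- def compute_ccc_intersection(per_model_example_ids: Dict[str, Set[str]]) -> List[str]: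
--     if not per_model_example_ids:
--         raise ValueError("no models provided")
--     n = len(per_model_example_ids)
--     counts: Dict[str, int] = {}
--     for s in per_model_example_ids.values():
--         for x in s:
--             counts[x] = counts.get(x, 0) + 1
--     return sorted(x for x, c in counts.items() if c == n)
-- ===== Notes on version B (the rewrite author's own statement) =====
-- stated objective: alternative
-- what changed: Replaces the repeated set-intersection loop by a single-pass frequency tally over all ids followed by a filter keeping ids whose count equals the number of models.
import Mathlib
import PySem

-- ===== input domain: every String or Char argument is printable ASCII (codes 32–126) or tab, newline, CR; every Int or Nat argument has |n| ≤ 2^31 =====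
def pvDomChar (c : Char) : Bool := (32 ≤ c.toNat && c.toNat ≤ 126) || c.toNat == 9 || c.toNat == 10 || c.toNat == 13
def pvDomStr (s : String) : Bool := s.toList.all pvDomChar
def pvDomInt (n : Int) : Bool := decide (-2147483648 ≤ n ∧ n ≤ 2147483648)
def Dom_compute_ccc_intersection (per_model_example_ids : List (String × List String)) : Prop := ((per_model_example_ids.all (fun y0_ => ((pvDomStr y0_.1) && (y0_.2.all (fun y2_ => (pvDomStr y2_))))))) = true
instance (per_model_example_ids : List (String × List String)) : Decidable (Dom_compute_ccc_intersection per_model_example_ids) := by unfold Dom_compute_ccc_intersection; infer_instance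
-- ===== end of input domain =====

-- B replaces A's repeated set-intersection loop by a one-pass frequency tally over all ids,
-- keeping the ids whose count equals the number of models (objective: alternative algorithm).

-- ===== PORT A =====
-- A: inter = set(first value); for each further value set s: inter &= set(s); return sorted(inter).
def compute_ccc_intersection (per_model_example_ids : List (String × List String)) : List String :=
  match per_model_example_ids with
  | [] => []  -- unreachable under Pre_: the Python raises ValueError("no models provided")
  | (_, v) :: rest =>
    let inter := rest.foldl (fun acc p => PySem.Set.inter acc (PySem.Set.ofList p.2)) (PySem.Set.ofList v)
    PySem.List.sorted inter (fun x => x) false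

-- ===== PORT B =====
-- B: counts[x] = counts.get(x, 0) + 1 over every id of every value; keep ids with count == len(dict); sorted.
def compute_ccc_intersection_alt (per_model_example_ids : List (String × List String)) : List String :=
  match per_model_example_ids with
  | [] => []  -- unreachable under Pre_: the Python raises ValueError("no models provided")
  | _ :: _ =>
    let n : Int := per_model_example_ids.length
    let counts : PySem.Dict String Int :=
      per_model_example_ids.foldl
        (fun d p => p.2.foldl (fun d x => d.insert x (d.getD x 0 + 1)) d) PySem.Dict.empty
    PySem.List.sorted ((counts.items.filter (fun kc => kc.2 == n)).map (·.1)) (fun x => x) false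

-- ===== PRECONDITION & SPEC =====
-- Pre_ excludes the empty dict (A raises ValueError there) and requires each value list to be
-- duplicate-free, which is exactly the type-convention representation of a Python set[str]
-- (so it excludes no input the Python function actually receives).
def Pre_compute_ccc_intersection (per_model_example_ids : List (String × List String)) : Prop :=
  per_model_example_ids ≠ [] ∧ ∀ p ∈ per_model_example_ids, p.2.Nodup
instance (per_model_example_ids : List (String × List String)) : Decidable (Pre_compute_ccc_intersection per_model_example_ids) := by unfold Pre_compute_ccc_intersection; infer_instance

def pvWitness_compute_ccc_intersection : (List (String × List String)) :=
  [("m1", ["a", "b"]), ("m2", ["b", "c"])]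

def Spec_compute_ccc_intersection (per_model_example_ids : List (String × List String)) (out : List String) : Prop := out = compute_ccc_intersection_alt per_model_example_ids
instance (per_model_example_ids : List (String × List String)) (out : List String) : Decidable (Spec_compute_ccc_intersection per_model_example_ids out) := by unfold Spec_compute_ccc_intersection; infer_instance

-- ===== CLAIM (what is proved, stated in full; the proofs are below) =====
def Claim_equal_compute_ccc_intersection : Prop := ∀ (per_model_example_ids : List (String × List String)), Dom_compute_ccc_intersection per_model_example_ids → Pre_compute_ccc_intersection per_model_example_ids → Spec_compute_ccc_intersection per_model_example_ids (compute_ccc_intersection per_model_example_ids)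

-- ===== LEMMAS AND PROOFS =====

-- A's intersection loop: membership characterisation.
theorem mem_foldl_inter (rest : List (String × List String)) (acc : PySem.Set String) (x : String) :
    x ∈ rest.foldl (fun acc p => PySem.Set.inter acc (PySem.Set.ofList p.2)) acc ↔
      x ∈ acc ∧ ∀ p ∈ rest, x ∈ p.2 := by
  induction rest generalizing acc with
  | nil => simp
  | cons q t ih =>
    simp only [List.foldl_cons, ih, PySem.Set.mem_inter, PySem.Set.mem_ofList, List.mem_cons]
    constructor
    · rintro ⟨⟨hx, hq⟩, hall⟩
      exact ⟨hx, fun p hp => hp.elim (fun h => h ▸ hq) (hall p)⟩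
    · rintro ⟨hx, hall⟩
      exact ⟨⟨hx, hall q (Or.inl rfl)⟩, fun p hp => hall p (Or.inr hp)⟩

-- A's intersection loop preserves duplicate-freedom.
theorem nodup_foldl_inter (rest : List (String × List String)) (acc : PySem.Set String)
    (h : acc.Nodup) :
    (rest.foldl (fun acc p => PySem.Set.inter acc (PySem.Set.ofList p.2)) acc).Nodup := by
  induction rest generalizing acc with
  | nil => exact h
  | cons q t ih => exact ih _ (PySem.Set.nodup_inter _ _ h)

-- Counting in the concatenation of duplicate-free lists counts the lists containing x.
theorem count_flatMap_eq_countP (pm : List (String × List String)) (x : String)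
    (h : ∀ p ∈ pm, p.2.Nodup) :
    (pm.flatMap (·.2)).count x = pm.countP (fun p => decide (x ∈ p.2)) := by
  induction pm with
  | nil => simp
  | cons q t ih =>
    simp only [List.flatMap_cons, List.count_append, List.countP_cons]
    rw [ih (fun p hp => h p (List.mem_cons_of_mem q hp))]
    by_cases hx : x ∈ q.2
    · rw [List.count_eq_one_of_mem (h q (List.mem_cons_self)) hx]
      simp [hx, Nat.add_comm]
    · rw [List.count_eq_zero_of_not_mem hx]
      simp [hx]

-- ===== VERDICT (by name: the statement is the Claim_ definition above) =====
theorem compute_ccc_intersection_spec : Claim_equal_compute_ccc_intersection := by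
  intro pm _ hpre
  obtain ⟨hne, hnodup⟩ := hpre
  unfold Spec_compute_ccc_intersection
  match pm, hne with
  | (k, v) :: rest, _ =>
    simp only [compute_ccc_intersection, compute_ccc_intersection_alt]
    rw [← List.foldl_flatMap, PySem.Dict.foldl_insert_getD_add_one_eq_counter,
      PySem.Dict.items_counter, List.filter_map, List.map_map,
      PySem.List.sorted_id_eq_sorted_id_iff_perm]
    have hys : ((k, v) :: rest).flatMap (fun p => p.2) = v ++ rest.flatMap (fun p => p.2) := by
      simp
    rw [List.perm_ext_iff_of_nodup
      (nodup_foldl_inter rest _ (PySem.Set.nodup_ofList v))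
      (((PySem.Set.nodup_ofList _).filter _).map
        (fun a b h => by simpa using h))]
    intro x
    rw [mem_foldl_inter]
    simp only [List.mem_map, List.mem_filter, PySem.Set.mem_ofList, Function.comp]
    constructor
    · rintro ⟨hxv, hall⟩
      refine ⟨x, ⟨?_, ?_⟩, rfl⟩
      · rw [hys]; exact List.mem_append_left _ hxv
      · have hc : (((k, v) :: rest).flatMap (fun p => p.2)).count x =
            ((k, v) :: rest).countP (fun p => decide (x ∈ p.2)) :=
          count_flatMap_eq_countP _ x hnodup
        have hcp : ((k, v) :: rest).countP (fun p => decide (x ∈ p.2)) =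
            ((k, v) :: rest).length := by
          rw [List.countP_eq_length]
          intro p hp
          rcases List.mem_cons.mp hp with h | h
          · subst h; exact decide_eq_true hxv
          · exact decide_eq_true (hall p h)
        simp only [beq_iff_eq]
        rw [hc, hcp]
    · rintro ⟨y, ⟨hymem, hcnt⟩, rfl⟩
      simp only [beq_iff_eq] at hcnt
      have hc := count_flatMap_eq_countP ((k, v) :: rest) y hnodup
      have hcp : ((k, v) :: rest).countP (fun p => decide (y ∈ p.2)) =
          ((k, v) :: rest).length := by
        rw [← hc]; exact_mod_cast hcnt
      have hall := List.countP_eq_length.mp hcp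
      refine ⟨of_decide_eq_true (hall (k, v) List.mem_cons_self), fun p hp =>
        of_decide_eq_true (hall p (List.mem_cons_of_mem _ hp))⟩
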